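-- pv_equiv track=rewrite | github.com/islasimpson/CASanalysis | CASutils/lensread_utils.py | lens2memnamegen_first50
-- ===== SOURCE A (Python) =====
-- def lens2memnamegen_first50(nmems):
--     """Generate the member names for members 1-49 of LENS2
--     Input:
--       nmems = number of members
--     Output:
--       memstr(nmems) = an array containing nmems strings corresponding to the member names
--     """
--
--     memstr=[]
--     for imem in range(0,nmems,1):
--
--         if (imem < 10):
--             memstr1=str(1000+imem*20+1)
--             memstr2=str(imem+1).zfill(3)
--             memstr.append(memstr1+'.'+memstr2)
--
--         if ((imem >= 10) and (imem < 20)):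
--             memstr1=str(1231)
--             memstr2=str(imem-10+1).zfill(3)
--             memstr.append(memstr1+'.'+memstr2)
--
--         if ((imem >= 20) and (imem < 30)):
--             memstr1=str(1251)
--             memstr2=str(imem-20+1).zfill(3)
--             memstr.append(memstr1+'.'+memstr2)
--
--         if ((imem >= 30) and (imem < 40)):
--             memstr1=str(1281)
--             memstr2=str(imem-30+1).zfill(3)
--             memstr.append(memstr1+'.'+memstr2)
--
--         if (imem >= 40):
--             memstr1=str(1301)
--             memstr2=str(imem-40+1).zfill(3)
--             memstr.append(memstr1+'.'+memstr2)
--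
--
--     return memstr
-- ===== SOURCE B (Python) =====
-- def lens2memnamegen_first50(nmems):
--     memstr = []
--     for i in range(min(nmems, 10)):
--         memstr.append(str(1001 + 20 * i) + '.' + str(i + 1).zfill(3))
--     prefixes = [1231, 1251, 1281, 1301]
--     for d, p in enumerate(prefixes):
--         start = 10 * (d + 1)
--         end = 10 * (d + 2) if d < 3 else nmems
--         for i in range(start, min(end, nmems)):
--             memstr.append(str(p) + '.' + str(i - start + 1).zfill(3))
--     return memstr
-- ===== Notes on version B (the rewrite author's own statement) =====
-- stated objective: simpler
-- what changed: Replaces the flat per-member scan with five exclusive if-branches by a segmented generation: one loop for the special first decade, then an outer loop over the four constant decade prefixes with an inner loop over that decade's member indices.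
import Mathlib
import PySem

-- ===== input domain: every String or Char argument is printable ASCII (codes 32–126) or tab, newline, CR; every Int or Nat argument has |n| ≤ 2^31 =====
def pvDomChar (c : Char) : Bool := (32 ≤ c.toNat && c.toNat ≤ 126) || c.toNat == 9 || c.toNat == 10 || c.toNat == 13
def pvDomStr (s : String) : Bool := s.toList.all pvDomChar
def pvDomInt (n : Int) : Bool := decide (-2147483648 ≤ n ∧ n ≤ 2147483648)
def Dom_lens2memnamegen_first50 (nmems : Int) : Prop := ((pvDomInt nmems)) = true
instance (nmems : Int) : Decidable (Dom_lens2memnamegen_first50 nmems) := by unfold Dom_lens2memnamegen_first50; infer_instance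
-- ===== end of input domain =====

-- B restructures A's flat five-branch scan into segment loops (first decade, then the four
-- constant decade prefixes); same output, same O(n) cost — objective: simpler decomposition.

-- ===== PORT A =====
def lens2memnamegen_first50 (nmems : Int) : List String :=
  (PySem.List.pyRange 0 nmems 1).foldl (fun memstr imem =>
    let memstr := if imem < 10 then
        memstr ++ [PySem.Int.toStr (1000 + imem * 20 + 1) ++ "." ++ PySem.Str.zfill (PySem.Int.toStr (imem + 1)) 3]
      else memstr
    let memstr := if 10 ≤ imem ∧ imem < 20 then
        memstr ++ [PySem.Int.toStr 1231 ++ "." ++ PySem.Str.zfill (PySem.Int.toStr (imem - 10 + 1)) 3]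
      else memstr
    let memstr := if 20 ≤ imem ∧ imem < 30 then
        memstr ++ [PySem.Int.toStr 1251 ++ "." ++ PySem.Str.zfill (PySem.Int.toStr (imem - 20 + 1)) 3]
      else memstr
    let memstr := if 30 ≤ imem ∧ imem < 40 then
        memstr ++ [PySem.Int.toStr 1281 ++ "." ++ PySem.Str.zfill (PySem.Int.toStr (imem - 30 + 1)) 3]
      else memstr
    let memstr := if 40 ≤ imem then
        memstr ++ [PySem.Int.toStr 1301 ++ "." ++ PySem.Str.zfill (PySem.Int.toStr (imem - 40 + 1)) 3]
      else memstr
    memstr) []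

-- ===== PORT B =====
def lens2memnamegen_first50_alt (nmems : Int) : List String :=
  let memstr := (PySem.List.pyRange 0 (min nmems 10) 1).foldl
    (fun acc i => acc ++ [PySem.Int.toStr (1001 + 20 * i) ++ "." ++ PySem.Str.zfill (PySem.Int.toStr (i + 1)) 3]) []
  (PySem.List.enumerate [(1231 : Int), 1251, 1281, 1301] 0).foldl
    (fun acc dp =>
      let start := 10 * (dp.1 + 1)
      let e := if dp.1 < 3 then 10 * (dp.1 + 2) else nmems
      (PySem.List.pyRange start (min e nmems) 1).foldl
        (fun acc2 i => acc2 ++ [PySem.Int.toStr dp.2 ++ "." ++ PySem.Str.zfill (PySem.Int.toStr (i - start + 1)) 3]) acc)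
    memstr

-- ===== PRECONDITION & SPEC =====
def Spec_lens2memnamegen_first50 (nmems : Int) (out : List String) : Prop := out = lens2memnamegen_first50_alt nmems
instance (nmems : Int) (out : List String) : Decidable (Spec_lens2memnamegen_first50 nmems out) := by unfold Spec_lens2memnamegen_first50; infer_instance

-- ===== CLAIM (what is proved, stated in full; the proofs are below) =====
def Claim_equal_lens2memnamegen_first50 : Prop := ∀ (nmems : Int), Dom_lens2memnamegen_first50 nmems → Spec_lens2memnamegen_first50 nmems (lens2memnamegen_first50 nmems)

-- ===== LEMMAS AND PROOFS =====

-- the member name of index i (proof-only characterisation of both programs)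
def memname (i : Int) : String :=
  if i < 10 then PySem.Int.toStr (1000 + i * 20 + 1) ++ "." ++ PySem.Str.zfill (PySem.Int.toStr (i + 1)) 3
  else if i < 20 then PySem.Int.toStr 1231 ++ "." ++ PySem.Str.zfill (PySem.Int.toStr (i - 10 + 1)) 3
  else if i < 30 then PySem.Int.toStr 1251 ++ "." ++ PySem.Str.zfill (PySem.Int.toStr (i - 20 + 1)) 3
  else if i < 40 then PySem.Int.toStr 1281 ++ "." ++ PySem.Str.zfill (PySem.Int.toStr (i - 30 + 1)) 3
  else PySem.Int.toStr 1301 ++ "." ++ PySem.Str.zfill (PySem.Int.toStr (i - 40 + 1)) 3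

theorem flatten_map_singleton {α β : Type} (g : α → β) (l : List α) :
    (l.map (fun x => [g x])).flatten = l.map g := by
  induction l with
  | nil => rfl
  | cons a t ih => simp [ih]

theorem pyRange_split (a m b : Int) (h : a ≤ m) :
    PySem.List.pyRange a b 1 = PySem.List.pyRange a (min b m) 1 ++ PySem.List.pyRange m b 1 := by
  rcases le_total m b with hm | hm
  · rw [min_eq_right hm]
    exact PySem.List.pyRange_one_append a m b h hm
  · rw [min_eq_left hm, PySem.List.pyRange_one_eq_nil hm, List.append_nil]

theorem A_eq (n : Int) :
    lens2memnamegen_first50 n = (PySem.List.pyRange 0 n 1).map memname := by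
  unfold lens2memnamegen_first50
  rw [PySem.List.foldl_congr_mem _ _ (fun acc x => acc ++ [memname x]) [] ?h,
      PySem.List.foldl_append_singleton_eq_map, List.nil_append]
  case h =>
    intro acc x hx
    have hx0 : 0 ≤ x := (PySem.List.mem_pyRange_one.1 hx).1
    simp only [memname]
    split_ifs <;> simp_all <;> omega

theorem B_eq (n : Int) :
    lens2memnamegen_first50_alt n =
      (PySem.List.pyRange 0 (min n 10) 1).map memname ++
      (PySem.List.pyRange 10 (min 20 n) 1).map memname ++
      (PySem.List.pyRange 20 (min 30 n) 1).map memname ++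
      (PySem.List.pyRange 30 (min 40 n) 1).map memname ++
      (PySem.List.pyRange 40 n 1).map memname := by
  unfold lens2memnamegen_first50_alt
  rw [show PySem.List.enumerate [(1231 : Int), 1251, 1281, 1301] 0
       = [(0,1231),(1,1251),(2,1281),(3,1301)] from by decide]
  simp only [List.foldl_cons, List.foldl_nil]
  norm_num
  rw [flatten_map_singleton, flatten_map_singleton, flatten_map_singleton,
      flatten_map_singleton, flatten_map_singleton]
  congr 1
  · exact List.map_congr_left (fun x hx => by
      have h := PySem.List.mem_pyRange_one.1 hx
      have h2 : x < 10 := lt_of_lt_of_le h.2 (min_le_right _ _)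
      simp only [memname]; rw [if_pos h2]; ring_nf)
  congr 1
  · exact List.map_congr_left (fun x hx => by
      have h := PySem.List.mem_pyRange_one.1 hx
      have h2 : x < 20 := lt_of_lt_of_le h.2 (min_le_left _ _)
      simp only [memname]; rw [if_neg (by omega), if_pos (by omega)])
  congr 1
  · exact List.map_congr_left (fun x hx => by
      have h := PySem.List.mem_pyRange_one.1 hx
      have h2 : x < 30 := lt_of_lt_of_le h.2 (min_le_left _ _)
      simp only [memname]; rw [if_neg (by omega), if_neg (by omega), if_pos (by omega)])
  congr 1
  · exact List.map_congr_left (fun x hx => by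
      have h := PySem.List.mem_pyRange_one.1 hx
      have h2 : x < 40 := lt_of_lt_of_le h.2 (min_le_left _ _)
      simp only [memname]
      rw [if_neg (by omega), if_neg (by omega), if_neg (by omega), if_pos (by omega)])
  · exact List.map_congr_left (fun x hx => by
      have h := PySem.List.mem_pyRange_one.1 hx
      simp only [memname]
      rw [if_neg (by omega), if_neg (by omega), if_neg (by omega), if_neg (by omega)])

-- ===== VERDICT (by name: the statement is the Claim_ definition above) =====
theorem lens2memnamegen_first50_spec : Claim_equal_lens2memnamegen_first50 := by
  intro n _
  show lens2memnamegen_first50 n = lens2memnamegen_first50_alt n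
  rw [A_eq, B_eq]
  rw [pyRange_split 0 10 n (by omega)]
  rw [pyRange_split 10 20 n (by omega)]
  rw [pyRange_split 20 30 n (by omega)]
  rw [pyRange_split 30 40 n (by omega)]
  simp [min_comm, List.append_assoc]
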